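-- pv_equiv track=rewrite | github.com/WitheringRiser/BookWebScraper | WebScrapingYP_Bookfinder.py | BF_remove_duplicates_and_create_volumes_to_titles
-- ===== SOURCE A (Python) =====
-- def BF_remove_duplicates_and_create_volumes_to_titles(titles_links_volumes):
-- 	volume_to_all_titles = {}
-- 	for title in titles_links_volumes:
-- 		book_info = titles_links_volumes[title]
-- 		volume_number = book_info['Volume']
-- 		if volume_number in volume_to_all_titles:
-- 			volume_to_all_titles[volume_number].append(title)
-- 		else:
-- 			volume_to_all_titles[volume_number] = [title]
--
--
-- 	return volume_to_all_titles
-- ===== SOURCE B (Python) =====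
-- def BF_remove_duplicates_and_create_volumes_to_titles(titles_links_volumes):
--     # Two-pass: collect distinct volumes in first-occurrence order, then one
--     # comprehension per volume; equal to A's dict because dicts keep insertion order.
--     volumes = []
--     for info in titles_links_volumes.values():
--         v = info['Volume']
--         if v not in volumes:
--             volumes.append(v)
--     return {v: [t for t in titles_links_volumes
--                 if titles_links_volumes[t]['Volume'] == v]
--             for v in volumes}
-- ===== Notes on version B (the rewrite author's own statement) =====
-- stated objective: alternative
-- what changed: A builds the grouping dict in one pass, appending each title to its volume's bucket; B first collects the distinct volumes in first-occurrence order and then builds each volume's title list with a separate filtering comprehension.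
import Mathlib
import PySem

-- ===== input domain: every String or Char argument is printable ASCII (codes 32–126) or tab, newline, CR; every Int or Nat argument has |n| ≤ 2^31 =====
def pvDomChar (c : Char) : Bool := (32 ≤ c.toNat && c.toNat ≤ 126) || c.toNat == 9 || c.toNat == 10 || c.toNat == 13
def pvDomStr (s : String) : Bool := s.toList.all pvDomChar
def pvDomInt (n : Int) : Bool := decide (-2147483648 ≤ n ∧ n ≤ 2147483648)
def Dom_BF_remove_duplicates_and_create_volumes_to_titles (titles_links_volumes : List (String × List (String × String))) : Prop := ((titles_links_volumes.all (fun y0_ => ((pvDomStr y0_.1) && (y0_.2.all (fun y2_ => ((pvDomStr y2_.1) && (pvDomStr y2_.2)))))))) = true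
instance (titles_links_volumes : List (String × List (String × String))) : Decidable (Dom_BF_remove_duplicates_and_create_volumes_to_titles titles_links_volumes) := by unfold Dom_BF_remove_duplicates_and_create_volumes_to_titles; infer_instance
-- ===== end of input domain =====

-- B replaces A's one-pass dict accumulation by a distinct-volumes pass followed by one
-- filtering comprehension per volume (alternative decomposition, same return value).

-- ===== PORT A =====
def BF_remove_duplicates_and_create_volumes_to_titles (titles_links_volumes : List (String × List (String × String))) : List (String × List String) :=
  (titles_links_volumes.foldl (fun acc p =>
      let book_info := (PySem.Dict.mk titles_links_volumes).getD p.1 []      -- titles_links_volumes[title]; Pre_ guarantees the key is found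
      let volume_number := (PySem.Dict.mk book_info).getD "Volume" ""        -- book_info['Volume']; KeyError excluded by Pre_
      if acc.contains volume_number then
        acc.modify volume_number [] (fun ts => ts ++ [p.1])                  -- volume_to_all_titles[v].append(title)
      else
        acc.insert volume_number [p.1])                                      -- volume_to_all_titles[v] = [title]
    PySem.Dict.empty).items

-- ===== PORT B =====
def BF_remove_duplicates_and_create_volumes_to_titles_alt (titles_links_volumes : List (String × List (String × String))) : List (String × List String) :=
  let volumes := titles_links_volumes.foldl (fun vs p =>
      let v := (PySem.Dict.mk p.2).getD "Volume" ""                          -- info['Volume']; KeyError excluded by Pre_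
      if v ∈ vs then vs else vs ++ [v]) []
  volumes.map (fun v =>
    (v, (titles_links_volumes.filter (fun q =>
          (PySem.Dict.mk ((PySem.Dict.mk titles_links_volumes).getD q.1 [])).getD "Volume" "" == v)).map (·.1)))

-- ===== PRECONDITION & SPEC =====
-- Pre_ excludes association lists whose title keys repeat (a Python dict argument cannot
-- have duplicate keys, so no actual input of A is excluded) and inputs where some book's
-- info dict lacks the key 'Volume', on which A raises KeyError (and B raises too).
def Pre_BF_remove_duplicates_and_create_volumes_to_titles (titles_links_volumes : List (String × List (String × String))) : Prop :=
  (titles_links_volumes.map (·.1)).Nodup ∧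
  ∀ p ∈ titles_links_volumes, (PySem.Dict.mk p.2).contains "Volume" = true
instance (titles_links_volumes : List (String × List (String × String))) : Decidable (Pre_BF_remove_duplicates_and_create_volumes_to_titles titles_links_volumes) := by unfold Pre_BF_remove_duplicates_and_create_volumes_to_titles; infer_instance

def pvWitness_BF_remove_duplicates_and_create_volumes_to_titles : (List (String × List (String × String))) :=
  [("Book A", [("Volume", "1"), ("Link", "x")]), ("Book B", [("Volume", "1")]), ("Book C", [("Volume", "2")])]

def Spec_BF_remove_duplicates_and_create_volumes_to_titles (titles_links_volumes : List (String × List (String × String))) (out : List (String × List String)) : Prop := out = BF_remove_duplicates_and_create_volumes_to_titles_alt titles_links_volumes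
instance (titles_links_volumes : List (String × List (String × String))) (out : List (String × List String)) : Decidable (Spec_BF_remove_duplicates_and_create_volumes_to_titles titles_links_volumes out) := by unfold Spec_BF_remove_duplicates_and_create_volumes_to_titles; infer_instance

-- ===== CLAIM (what is proved, stated in full; the proofs are below) =====
def Claim_equal_BF_remove_duplicates_and_create_volumes_to_titles : Prop := ∀ (titles_links_volumes : List (String × List (String × String))), Dom_BF_remove_duplicates_and_create_volumes_to_titles titles_links_volumes → Pre_BF_remove_duplicates_and_create_volumes_to_titles titles_links_volumes → Spec_BF_remove_duplicates_and_create_volumes_to_titles titles_links_volumes (BF_remove_duplicates_and_create_volumes_to_titles titles_links_volumes)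

-- ===== LEMMAS AND PROOFS =====

-- Generic grouping fold (A's loop shape) over any element type with a key and a name.
def pvGFold {β : Type} (k nm : β → String) (xs : List β) : PySem.Dict String (List String) :=
  xs.foldl (fun acc p =>
    if acc.contains (k p) then acc.modify (k p) [] (fun ts => ts ++ [nm p])
    else acc.insert (k p) [nm p]) PySem.Dict.empty

-- Distinct keys in first-occurrence order (B's first loop shape).
def pvDKeys {β : Type} (k : β → String) (xs : List β) : List String :=
  xs.foldl (fun vs p => if k p ∈ vs then vs else vs ++ [k p]) []

theorem pvDKeys_append {β : Type} (k : β → String) (xs : List β) (p : β) :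
    pvDKeys k (xs ++ [p]) =
      if k p ∈ pvDKeys k xs then pvDKeys k xs else pvDKeys k xs ++ [k p] := by
  simp [pvDKeys, List.foldl_append]

theorem pvGFold_append {β : Type} (k nm : β → String) (xs : List β) (p : β) :
    pvGFold k nm (xs ++ [p]) =
      (if (pvGFold k nm xs).contains (k p) then
        (pvGFold k nm xs).modify (k p) [] (fun ts => ts ++ [nm p])
      else (pvGFold k nm xs).insert (k p) [nm p]) := by
  simp [pvGFold, List.foldl_append]

theorem pvDKeys_eq_ofList {β : Type} (k : β → String) (xs : List β) :
    pvDKeys k xs = PySem.Set.ofList (xs.map k) := by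
  unfold pvDKeys
  rw [← PySem.Set.update_nil_left, PySem.Set.update_map_eq_foldl_add]
  apply PySem.List.foldl_congr_mem
  intro acc p _
  rw [PySem.Set.add_eq_ite]

theorem pvMem_dKeys {β : Type} (k : β → String) (xs : List β) (v : String) :
    v ∈ pvDKeys k xs ↔ ∃ p ∈ xs, k p = v := by
  rw [pvDKeys_eq_ofList]
  simp [PySem.Set.mem_ofList]

theorem pvNodup_dKeys {β : Type} (k : β → String) (xs : List β) :
    (pvDKeys k xs).Nodup := by
  rw [pvDKeys_eq_ofList]
  exact PySem.Set.nodup_ofList _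

-- the group-by characterisation: A's fold, as an items list, is B's map-of-filters
theorem pvGFold_items {β : Type} (k nm : β → String) (xs : List β) :
    (pvGFold k nm xs).items =
      (pvDKeys k xs).map (fun v => (v, (xs.filter (fun p => k p == v)).map nm)) := by
  induction xs using List.reverseRecOn with
  | nil => simp [pvGFold, pvDKeys, PySem.Dict.empty]
  | append_singleton xs p ih =>
    have hkeys : (pvGFold k nm xs).keys = pvDKeys k xs := by
      show (pvGFold k nm xs).items.map (·.1) = _
      rw [ih, List.map_map]; simp [Function.comp_def]
    have hnd : (pvGFold k nm xs).keys.Nodup := by rw [hkeys]; exact pvNodup_dKeys k xs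
    rw [pvGFold_append, pvDKeys_append]
    by_cases h : k p ∈ pvDKeys k xs
    · have hc : (pvGFold k nm xs).contains (k p) = true := by
        rw [PySem.Dict.contains_iff_mem_keys, hkeys]; exact h
      have hgetD : (pvGFold k nm xs).getD (k p) [] = (xs.filter (fun q => k q == k p)).map nm := by
        apply PySem.Dict.getD_of_mem_items _ _ hnd
        rw [ih]; exact List.mem_map_of_mem h
      rw [if_pos hc, if_pos h]
      simp only [PySem.Dict.modify]
      rw [PySem.Dict.items_insert_of_contains _ _ hc, hgetD, ih, List.map_map]
      apply List.map_congr_left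
      intro v hv
      by_cases hvp : v = k p
      · subst hvp
        simp [List.filter_append]
      · have h1 : (v == k p) = false := by simpa using hvp
        have h2 : (k p == v) = false := by simpa using fun e => hvp e.symm
        simp [h2, List.filter_append, hvp]
    · have hc : (pvGFold k nm xs).contains (k p) = false := by
        rw [← Bool.not_eq_true, PySem.Dict.contains_iff_mem_keys, hkeys]
        simpa using h
      have hnone : xs.filter (fun q => k q == k p) = [] := by
        rw [List.filter_eq_nil_iff]
        intro q hq hkq
        exact h ((pvMem_dKeys k xs (k p)).mpr ⟨q, hq, by simpa using hkq⟩)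
      rw [if_neg (by simp [hc]), if_neg h,
        PySem.Dict.items_insert_of_not_contains _ _ hc, ih, List.map_append]
      congr 1
      · apply List.map_congr_left
        intro v hv
        have h2 : (k p == v) = false := by
          simpa using fun e : k p = v => h (by rw [e]; exact hv)
        simp [List.filter_append, h2]
      · simp [List.filter_append, hnone]

-- ===== VERDICT (by name: the statement is the Claim_ definition above) =====
theorem BF_remove_duplicates_and_create_volumes_to_titles_spec : Claim_equal_BF_remove_duplicates_and_create_volumes_to_titles := by
  intro xs hdom hpre
  obtain ⟨hnd, hvol⟩ := hpre
  unfold Spec_BF_remove_duplicates_and_create_volumes_to_titles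
  have hndk : (PySem.Dict.mk xs).keys.Nodup := hnd
  have hlk : ∀ p ∈ xs, (PySem.Dict.mk xs).getD p.1 [] = p.2 := by
    intro p hp
    exact PySem.Dict.getD_of_mem_items (PySem.Dict.mk xs) hp hndk []
  have hA : BF_remove_duplicates_and_create_volumes_to_titles xs =
      (pvGFold (fun p => (PySem.Dict.mk ((PySem.Dict.mk xs).getD p.1 [])).getD "Volume" "")
        (fun p => p.1) xs).items := rfl
  have hfold : pvGFold (fun p => (PySem.Dict.mk ((PySem.Dict.mk xs).getD p.1 [])).getD "Volume" "")
      (fun p => p.1) xs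
      = pvGFold (fun p => (PySem.Dict.mk p.2).getD "Volume" "") (fun p => p.1) xs := by
    unfold pvGFold
    apply PySem.List.foldl_congr_mem
    intro acc p hp
    simp only [hlk p hp]
  have hB : BF_remove_duplicates_and_create_volumes_to_titles_alt xs =
      (pvDKeys (fun p => (PySem.Dict.mk p.2).getD "Volume" "") xs).map
        (fun v => (v, (xs.filter (fun q => (PySem.Dict.mk q.2).getD "Volume" "" == v)).map (fun p => p.1))) := by
    show (pvDKeys (fun p => (PySem.Dict.mk p.2).getD "Volume" "") xs).map
        (fun v => (v, (xs.filter (fun q =>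
          (PySem.Dict.mk ((PySem.Dict.mk xs).getD q.1 [])).getD "Volume" "" == v)).map (fun p => p.1))) = _
    apply List.map_congr_left
    intro v hv
    congr 1
    congr 1
    apply List.filter_congr
    intro q hq
    rw [hlk q hq]
  rw [hA, hfold, pvGFold_items, hB]
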